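-- pv_equiv track=rewrite | github.com/tr0up2r/coding-test | website/softeer/043_room_reservation.py | find_available
-- ===== SOURCE A (Python) =====
-- def find_available(data):
--     data = data[9:]
--     index_list = []
--     sub = []
--     for i in range(len(data)):
--         if data[i] == True:
--             sub.append(i+9)
--         else:
--             if len(sub) >= 1:
--                 index_list.append(sub)
--                 sub = []
--     if len(sub) >= 1:
--         index_list.append(sub)
--     return index_list
-- ===== SOURCE B (Python) =====
-- def find_available(data):
--     d = data[9:]
--     n = len(d)
--     starts = [i for i in range(n) if d[i] == True and (i == 0 or d[i - 1] != True)]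
--     ends = [i for i in range(n) if d[i] == True and (i == n - 1 or d[i + 1] != True)]
--     return [list(range(s + 9, e + 10)) for s, e in zip(starts, ends)]
-- ===== Notes on version B (the rewrite author's own statement) =====
-- stated objective: alternative
-- what changed: Replaces A's accumulator-and-flush scan with boundary detection: two neighbour-comparison passes collect the start indices and end indices of maximal True runs, which are zipped and expanded arithmetically with range(s+9, e+10); no run is ever accumulated element by element.
import Mathlib
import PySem

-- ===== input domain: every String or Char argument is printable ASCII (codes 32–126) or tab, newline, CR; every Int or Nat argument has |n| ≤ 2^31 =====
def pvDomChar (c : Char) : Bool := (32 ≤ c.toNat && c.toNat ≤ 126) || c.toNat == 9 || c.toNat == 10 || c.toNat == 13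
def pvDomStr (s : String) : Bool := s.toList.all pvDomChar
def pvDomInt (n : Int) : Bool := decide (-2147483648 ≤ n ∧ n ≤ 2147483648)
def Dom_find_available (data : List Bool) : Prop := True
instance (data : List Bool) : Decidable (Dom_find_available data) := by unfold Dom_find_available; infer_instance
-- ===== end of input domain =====

-- B finds run boundaries (start/end indices) by neighbour comparison and rebuilds each run with range, instead of A's accumulate-and-flush scan.

-- ===== PORT A =====
-- A: slice off the first 9 slots, then scan indices, accumulating a pending run `sub`
-- and flushing it into `index_list` at each False and once at the end.
def find_available (data : List Bool) : List (List Int) :=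
  let d := PySem.List.slice data (some 9) none
  let st := (PySem.List.pyRange 0 d.length 1).foldl
    (fun (st : List (List Int) × List Int) i =>
      if PySem.List.pyGetD d i false == true then (st.1, st.2 ++ [i + 9])
      else if 1 ≤ st.2.length then (st.1 ++ [st.2], ([] : List Int)) else st)
    ([], [])
  if 1 ≤ st.2.length then st.1 ++ [st.2] else st.1

-- ===== PORT B =====
-- B: starts = indices whose left neighbour is not True, ends = indices whose right
-- neighbour is not True; zip them and expand each pair to range(s+9, e+10).
-- Python short-circuits `i == 0 or d[i-1] != True` (and the symmetric test), so the
-- neighbour access is never out of range; pyGetD's value on the ored-out operand is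
-- irrelevant to the boolean value, making this total rendering exact.
def find_available_alt (data : List Bool) : List (List Int) :=
  let d := PySem.List.slice data (some 9) none
  let n : Int := d.length
  let starts := (PySem.List.pyRange 0 n 1).filter (fun i =>
      PySem.List.pyGetD d i false == true &&
      ((i == 0) || (PySem.List.pyGetD d (i - 1) false != true)))
  let ends := (PySem.List.pyRange 0 n 1).filter (fun i =>
      PySem.List.pyGetD d i false == true &&
      ((i == n - 1) || (PySem.List.pyGetD d (i + 1) false != true)))
  (starts.zip ends).map (fun p => PySem.List.pyRange (p.1 + 9) (p.2 + 10) 1)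

-- ===== PRECONDITION & SPEC =====
def Spec_find_available (data : List Bool) (out : List (List Int)) : Prop := out = find_available_alt data
instance (data : List Bool) (out : List (List Int)) : Decidable (Spec_find_available data out) := by unfold Spec_find_available; infer_instance

-- ===== CLAIM (what is proved, stated in full; the proofs are below) =====
def Claim_equal_find_available : Prop := ∀ (data : List Bool), Dom_find_available data → Spec_find_available data (find_available data)

-- ===== LEMMAS AND PROOFS =====

-- A's loop state transformer on one (index, value) pair, and the final flush.
def stepA (st : List (List Int) × List Int) (p : Int × Bool) : List (List Int) × List Int :=
  if p.2 == true then (st.1, st.2 ++ [p.1]) else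
  if 1 ≤ st.2.length then (st.1 ++ [st.2], ([] : List Int)) else st

def finishA (st : List (List Int) × List Int) : List (List Int) :=
  if 1 ≤ st.2.length then st.1 ++ [st.2] else st.1

-- A's loop, rephrased structurally on the enumerated list, after the final flush
-- ("preQ sub l" = what A still produces given pending run sub and remaining input l).
def preQ (sub : List Int) : List (Int × Bool) → List (List Int)
  | [] => if 1 ≤ sub.length then [sub] else []
  | (i, true) :: r => preQ (sub ++ [i]) r
  | (_, false) :: r => (if 1 ≤ sub.length then [sub] else []) ++ preQ [] r

theorem loopA_eq_preQ (l : List (Int × Bool)) :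
    ∀ (acc : List (List Int)) (sub : List Int),
      finishA (l.foldl stepA (acc, sub)) = acc ++ preQ sub l := by
  induction l with
  | nil =>
      intro acc sub
      simp only [List.foldl_nil, preQ, finishA]
      split <;> simp
  | cons p r ih =>
      intro acc sub
      obtain ⟨i, b⟩ := p
      cases b with
      | true =>
          simpa [stepA, List.foldl_cons, preQ] using ih acc (sub ++ [i])
      | false =>
          simp only [List.foldl_cons, preQ]
          by_cases h : 1 ≤ sub.length
          · have hs : stepA (acc, sub) (i, false) = (acc ++ [sub], []) := by
              simp [stepA, h]
            rw [hs, ih (acc ++ [sub]) []]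
            simp [h]
          · have hsub : sub = [] := by
              cases sub with
              | nil => rfl
              | cons x xs => exact absurd (by simp) h
            have hs : stepA (acc, sub) (i, false) = (acc, sub) := by
              simp [stepA, h]
            rw [hs, ih acc sub, hsub]
            simp

-- shifting the enumeration start by 9 moves the +9 out of the loop body
theorem enum_shift_fold (d : List Bool) :
    ∀ (s : Int) (st : List (List Int) × List Int),
      (PySem.List.enumerate d s).foldl (fun st p => stepA st (p.1 + 9, p.2)) st
      = (PySem.List.enumerate d (s + 9)).foldl stepA st := by
  induction d with
  | nil => intro s st; simp [PySem.List.enumerate_nil]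
  | cons x xs ih =>
      intro s st
      rw [PySem.List.enumerate_cons, PySem.List.enumerate_cons, List.foldl_cons,
        List.foldl_cons, ih (s + 1)]
      ring_nf

-- A's pyRange/pyGetD fold equals the fold of stepA over the enumerated list.
theorem foldA_enum (d : List Bool) (acc : List (List Int)) (sub : List Int) :
    (PySem.List.pyRange 0 d.length 1).foldl
      (fun (st : List (List Int) × List Int) i =>
        if PySem.List.pyGetD d i false == true then (st.1, st.2 ++ [i + 9])
        else if 1 ≤ st.2.length then (st.1 ++ [st.2], ([] : List Int)) else st)
      (acc, sub)
    = (PySem.List.enumerate d 9).foldl stepA (acc, sub) := by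
  have h := PySem.List.enumerate_eq_map_pyRange (xs := d) (d := false)
  have h2 : (PySem.List.enumerate d 0).foldl (fun st p => stepA st (p.1 + 9, p.2)) (acc, sub)
      = (PySem.List.pyRange 0 d.length 1).foldl
          (fun (st : List (List Int) × List Int) i =>
            if PySem.List.pyGetD d i false == true then (st.1, st.2 ++ [i + 9])
            else if 1 ≤ st.2.length then (st.1 ++ [st.2], ([] : List Int)) else st)
          (acc, sub) := by
    rw [h, List.foldl_map]
    rfl
  rw [← h2, enum_shift_fold d 0]
  norm_num

-- ==== boundary description of the runs ====

def headB : List Bool → Bool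
  | [] => false
  | b :: _ => b

-- run-start indices (prev = value of the element to the left, false at the left edge)
def startsRec (prev : Bool) (i : Int) : List Bool → List Int
  | [] => []
  | b :: t => (if b && !prev then [i] else []) ++ startsRec b (i + 1) t

-- run-end indices (lookahead to the right neighbour, false at the right edge)
def endsRec (i : Int) : List Bool → List Int
  | [] => []
  | b :: t => (if b && !(headB t) then [i] else []) ++ endsRec (i + 1) t

-- end indices still to come given we are inside a run just before position i
def endsAux (i : Int) (d : List Bool) : List Int :=
  if headB d then endsRec i d else (i - 1) :: endsRec i d

def rangeF (p : Int × Int) : List Int := PySem.List.pyRange p.1 (p.2 + 1) 1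

theorem headB_nil : headB [] = false := rfl
theorem headB_cons (b : Bool) (t : List Bool) : headB (b :: t) = b := rfl

theorem pyRange_nonempty (a s : Int) (h : a < s) : 1 ≤ (PySem.List.pyRange a s 1).length := by
  rw [PySem.List.length_pyRange_one]
  omega

-- the central correspondence: A's flush-form preQ equals the zipped boundary lists
theorem preQ_boundary (d : List Bool) :
    (∀ s : Int, preQ [] (PySem.List.enumerate d s) =
       ((startsRec false s d).zip (endsRec s d)).map rangeF)
  ∧ (∀ s a : Int, a < s → preQ (PySem.List.pyRange a s 1) (PySem.List.enumerate d s) =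
       ((a :: startsRec true s d).zip (endsAux s d)).map rangeF) := by
  induction d with
  | nil =>
      constructor
      · intro s; simp [PySem.List.enumerate_nil, preQ, startsRec, endsRec]
      · intro s a h
        have h1 := pyRange_nonempty a s h
        simp [PySem.List.enumerate_nil, preQ, h1, startsRec, endsRec, endsAux, headB_nil, rangeF]
        omega
  | cons b t ih =>
      constructor
      · intro s
        rw [PySem.List.enumerate_cons]
        cases b with
        | false =>
            simp only [preQ, List.length_nil, List.nil_append]
            rw [ih.1 (s + 1)]
            simp [startsRec, endsRec]
        | true =>
            simp only [preQ, List.nil_append]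
            have h1 : ([s] : List Int) = PySem.List.pyRange s (s + 1) 1 :=
              (PySem.List.pyRange_one_singleton s).symm
            rw [h1, ih.2 (s + 1) s (by omega)]
            cases hh : headB t with
            | true => simp [startsRec, endsRec, endsAux, headB_cons, hh]
            | false => simp [startsRec, endsRec, endsAux, headB_cons, hh]
      · intro s a h
        rw [PySem.List.enumerate_cons]
        cases b with
        | true =>
            simp only [preQ]
            have h1 : PySem.List.pyRange a s 1 ++ [s] = PySem.List.pyRange a (s + 1) 1 :=
              (PySem.List.pyRange_one_succ_right (le_of_lt h)).symm
            rw [h1, ih.2 (s + 1) a (by omega)]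
            cases hh : headB t with
            | true => simp [startsRec, endsRec, endsAux, headB_cons, hh]
            | false => simp [startsRec, endsRec, endsAux, headB_cons, hh]
        | false =>
            have h1 := pyRange_nonempty a s h
            simp only [preQ, h1, if_pos]
            rw [ih.1 (s + 1)]
            simp only [startsRec, endsAux, headB_cons, List.zip_cons_cons, List.map_cons]
            simp [endsRec, rangeF]

-- B's start filter equals startsRec (suffix-generalised; fuel m = length - k)
theorem startsFilter (d : List Bool) :
    ∀ (m k : Nat), d.length - k = m → k ≤ d.length →
      (PySem.List.pyRange (k : Int) (d.length : Int) 1).filter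
        (fun i => PySem.List.pyGetD d i false == true &&
           ((i == 0) || (PySem.List.pyGetD d (i - 1) false != true)))
      = startsRec (if k = 0 then false else d.getD (k - 1) false) (k : Int) (d.drop k) := by
  intro m
  induction m with
  | zero =>
      intro k hm hk
      have hk' : k = d.length := by omega
      subst hk'
      rw [PySem.List.pyRange_one_eq_nil (by omega), List.drop_length]
      simp [startsRec]
  | succ m ih =>
      intro k hm hk
      have hklt : k < d.length := by omega
      rw [PySem.List.pyRange_one_cons (by exact_mod_cast hklt), List.filter_cons]
      have ihh := ih (k + 1) (by omega) (by omega)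
      push_cast at ihh
      rw [ihh]
      rw [List.drop_eq_getElem_cons hklt]
      simp only [startsRec]
      have hget : PySem.List.pyGetD d (k : Int) false = d[k] := by
        rw [PySem.List.pyGetD_natCast, List.getD_eq_getElem d false hklt]
      have hgetD : d.getD k false = d[k] := List.getD_eq_getElem d false hklt
      by_cases hk0 : k = 0
      · subst hk0
        have hget0 : PySem.List.pyGetD d (0 : Int) false = d[0] := by simpa using hget
        have h0 : d[0]?.getD false = d[0] := by
          simp [List.getElem?_eq_getElem hklt]
        cases hb : d[0] <;> simp [hget0, h0, hb]
      · have hkpos : 1 ≤ k := by omega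
        have hne : ((k : Int) == 0) = false := by
          simp only [beq_eq_false_iff_ne, ne_eq]
          exact_mod_cast hk0
        have hprev : PySem.List.pyGetD d ((k : Int) - 1) false = d.getD (k - 1) false := by
          have : ((k : Int) - 1) = ((k - 1 : Nat) : Int) := by push_cast [hkpos]; ring
          rw [this, PySem.List.pyGetD_natCast]
        simp only [hget, hgetD, hne, hk0, if_neg, Bool.false_or, hprev]
        cases hb : d[k] <;> cases hp : d.getD (k - 1) false <;> simp [hb, hp, hkpos]

-- B's end filter equals endsRec
theorem endsFilter (d : List Bool) :
    ∀ (m k : Nat), d.length - k = m → k ≤ d.length →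
      (PySem.List.pyRange (k : Int) (d.length : Int) 1).filter
        (fun i => PySem.List.pyGetD d i false == true &&
           ((i == (d.length : Int) - 1) || (PySem.List.pyGetD d (i + 1) false != true)))
      = endsRec (k : Int) (d.drop k) := by
  intro m
  induction m with
  | zero =>
      intro k hm hk
      have hk' : k = d.length := by omega
      subst hk'
      rw [PySem.List.pyRange_one_eq_nil (by omega), List.drop_length]
      simp [endsRec]
  | succ m ih =>
      intro k hm hk
      have hklt : k < d.length := by omega
      rw [PySem.List.pyRange_one_cons (by exact_mod_cast hklt), List.filter_cons]
      have ihh := ih (k + 1) (by omega) (by omega)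
      push_cast at ihh
      rw [ihh]
      rw [List.drop_eq_getElem_cons hklt]
      simp only [endsRec]
      have hget : PySem.List.pyGetD d (k : Int) false = d[k] := by
        rw [PySem.List.pyGetD_natCast, List.getD_eq_getElem d false hklt]
      by_cases hlast : k + 1 = d.length
      · have hdrop : d.drop (k + 1) = [] := by rw [hlast, List.drop_length]
        have heq : ((k : Int) == (d.length : Int) - 1) = true := by
          simp only [beq_iff_eq]; omega
        simp [hget, heq, hdrop, headB]
        cases hb : d[k] <;> simp [hb]
      · have hklt2 : k + 1 < d.length := by omega
        have hne : ((k : Int) == (d.length : Int) - 1) = false := by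
          simp only [beq_eq_false_iff_ne, ne_eq]; omega
        have hnext : PySem.List.pyGetD d ((k : Int) + 1) false = d[k + 1] := by
          have : ((k : Int) + 1) = ((k + 1 : Nat) : Int) := by push_cast; ring
          rw [this, PySem.List.pyGetD_natCast, List.getD_eq_getElem d false hklt2]
        have hhead : headB (d.drop (k + 1)) = d[k + 1] := by
          rw [List.drop_eq_getElem_cons hklt2]; rfl
        simp only [hget, hne, Bool.false_or, hnext, hhead]
        cases hb : d[k] <;> cases hn : d[k + 1] <;> simp [hb, hn]

-- shifting the base index of the boundary lists
theorem startsRec_shift (d : List Bool) :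
    ∀ (prev : Bool) (i c : Int),
      startsRec prev (i + c) d = (startsRec prev i d).map (· + c) := by
  induction d with
  | nil => intro prev i c; simp [startsRec]
  | cons b t ih =>
      intro prev i c
      have h : i + c + 1 = (i + 1) + c := by ring
      simp only [startsRec, h, ih b (i + 1) c, List.map_append]
      by_cases hb : (b && !prev) = true <;> simp [hb]

theorem endsRec_shift (d : List Bool) :
    ∀ (i c : Int), endsRec (i + c) d = (endsRec i d).map (· + c) := by
  induction d with
  | nil => intro i c; simp [endsRec]
  | cons b t ih =>
      intro i c
      have h : i + c + 1 = (i + 1) + c := by ring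
      simp only [endsRec, h, ih (i + 1) c, List.map_append]
      by_cases hb : (b && !(headB t)) = true <;> simp [hb]

-- the bridge, stated on the sliced list d
theorem bridge (d : List Bool) :
    finishA ((PySem.List.pyRange 0 d.length 1).foldl
      (fun (st : List (List Int) × List Int) i =>
        if PySem.List.pyGetD d i false == true then (st.1, st.2 ++ [i + 9])
        else if 1 ≤ st.2.length then (st.1 ++ [st.2], ([] : List Int)) else st)
      ([], []))
    = (((PySem.List.pyRange 0 (d.length : Int) 1).filter (fun i =>
          PySem.List.pyGetD d i false == true &&
          ((i == 0) || (PySem.List.pyGetD d (i - 1) false != true)))).zip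
       ((PySem.List.pyRange 0 (d.length : Int) 1).filter (fun i =>
          PySem.List.pyGetD d i false == true &&
          ((i == (d.length : Int) - 1) || (PySem.List.pyGetD d (i + 1) false != true))))).map
        (fun p => PySem.List.pyRange (p.1 + 9) (p.2 + 10) 1) := by
  rw [foldA_enum, loopA_eq_preQ, List.nil_append, (preQ_boundary d).1 9]
  have hsf := startsFilter d d.length 0 (by omega) (by omega)
  have hef := endsFilter d d.length 0 (by omega) (by omega)
  simp only [Nat.cast_zero, List.drop_zero, if_pos rfl] at hsf hef
  rw [hsf, hef]
  have hs : startsRec false 9 d = (startsRec false 0 d).map (· + 9) := by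
    have := startsRec_shift d false 0 9
    simpa using this
  have he : endsRec 9 d = (endsRec 0 d).map (· + 9) := by
    have := endsRec_shift d 0 9
    simpa using this
  rw [hs, he, List.zip_map, List.map_map]
  apply List.map_congr_left
  intro p _
  simp only [Function.comp, Prod.map, rangeF]
  congr 1
  ring

-- ===== VERDICT (by name: the statement is the Claim_ definition above) =====
theorem find_available_spec : Claim_equal_find_available := by
  intro data _
  show find_available data = find_available_alt data
  exact bridge (PySem.List.slice data (some 9) none)
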